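-- pv_equiv track=rewrite | github.com/AndyStan112/bitdefender-rev-lab | src/python/rev_decrypter/rev_decrypt.py | process_char
-- ===== SOURCE A (Python) =====
-- def ror(val, r_bits):
--     return ((val & 0xFF) >> r_bits | (val << (8 - r_bits)) & 0xFF) & 0xFF
--
-- def process_char(b):
--     orig = ror(b, 2)
--     for c in range(65, 91):
--         if ((-101 - c) | 0x20) & 0xFF == orig:
--             return c
--     for c in range(97, 123):
--         if ((-37 - c) ^ 0x20) & 0xFF == orig:
--             return c
--     for c in range(48, 58):
--         if (105 - c) & 0xFF == orig:
--             return c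
--     return orig
-- ===== SOURCE B (Python) =====
-- def ror(val, r_bits):
--     return ((val & 0xFF) >> r_bits | (val << (8 - r_bits)) & 0xFF) & 0xFF
--
-- def process_char(b):
--     orig = ror(b, 2)
--     if 65 <= 187 - orig <= 90 or 97 <= 187 - orig <= 122:
--         return 187 - orig
--     if 48 <= 105 - orig <= 57:
--         return 105 - orig
--     return orig
-- ===== Notes on version B (the rewrite author's own statement) =====
-- stated objective: simpler
-- what changed: Replaces A's three linear search loops over the sixty-two candidate characters (each re-encrypting the candidate and comparing against orig) with closed-form range tests on orig followed by a direct affine formula for the answer, so no scan happens at all.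
import Mathlib
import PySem

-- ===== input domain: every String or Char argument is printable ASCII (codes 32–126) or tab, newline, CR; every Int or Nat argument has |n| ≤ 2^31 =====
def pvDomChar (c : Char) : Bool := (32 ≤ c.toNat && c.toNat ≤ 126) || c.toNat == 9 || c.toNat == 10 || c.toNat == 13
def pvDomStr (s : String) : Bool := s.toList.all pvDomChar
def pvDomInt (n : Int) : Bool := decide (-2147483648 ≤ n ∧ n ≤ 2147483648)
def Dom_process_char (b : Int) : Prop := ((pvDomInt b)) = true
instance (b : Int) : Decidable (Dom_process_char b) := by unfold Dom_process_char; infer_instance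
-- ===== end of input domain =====

-- B replaces A's three 62-candidate search loops with closed-form range tests on orig (objective: simpler).

-- ===== PORT A =====
-- shared helper: the Python 'ror' (r_bits is only ever the literal 2; Lean shifts take a Nat count)
def rorP (val : Int) (r_bits : Nat) : Int :=
  PySem.Int.band
    (PySem.Int.bor ((PySem.Int.band val 0xFF) >>> r_bits)
                   (PySem.Int.band (val <<< (8 - r_bits)) 0xFF)) 0xFF

def process_char (b : Int) : Int :=
  let orig := rorP b 2
  match (PySem.List.pyRange 65 91 1).find?
      (fun c => PySem.Int.band (PySem.Int.bor (-101 - c) 0x20) 0xFF == orig) with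
  | some c => c
  | none =>
    match (PySem.List.pyRange 97 123 1).find?
        (fun c => PySem.Int.band (PySem.Int.bxor (-37 - c) 0x20) 0xFF == orig) with
    | some c => c
    | none =>
      match (PySem.List.pyRange 48 58 1).find?
          (fun c => PySem.Int.band (105 - c) 0xFF == orig) with
      | some c => c
      | none => orig

-- ===== PORT B =====
def process_char_alt (b : Int) : Int :=
  let orig := rorP b 2
  if (65 ≤ 187 - orig ∧ 187 - orig ≤ 90) ∨ (97 ≤ 187 - orig ∧ 187 - orig ≤ 122) then
    187 - orig
  else if 48 ≤ 105 - orig ∧ 105 - orig ≤ 57 then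
    105 - orig
  else
    orig

-- ===== PRECONDITION & SPEC =====
def Spec_process_char (b : Int) (out : Int) : Prop := out = process_char_alt b
instance (b : Int) (out : Int) : Decidable (Spec_process_char b out) := by unfold Spec_process_char; infer_instance

-- ===== CLAIM (what is proved, stated in full; the proofs are below) =====
def Claim_equal_process_char : Prop := ∀ (b : Int), Dom_process_char b → Spec_process_char b (process_char b)

-- ===== LEMMAS AND PROOFS =====
-- Python's  x & 0xFF  is  x mod 256  (also for negative x).
theorem nat_and255 (m : Nat) : 255 &&& m = m % 256 := by
  have := Nat.and_two_pow_sub_one_eq_mod m 8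
  rw [Nat.and_comm]
  norm_num at this
  omega

theorem band255_eq_emod (b : Int) : PySem.Int.band b 255 = b % 256 := by
  simp only [PySem.Int.band]
  have h255 : (255 : Int).toNat = 255 := rfl
  split_ifs with h h2 h2
  · rw [h255, Nat.and_comm, nat_and255]
    omega
  · norm_num at h2
  · rw [h255, nat_and255]
    omega
  · norm_num at h2

theorem shiftL6 (b : Int) : b <<< (6 : Nat) = b * 64 := by
  rw [Int.shiftLeft_eq]
  norm_num

theorem ror_congr (b : Int) : rorP b 2 = rorP (b % 256) 2 := by
  simp only [rorP, show (8 - 2 : Nat) = 6 from rfl,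
    shiftL6, band255_eq_emod]
  have h1 : b % 256 % 256 = b % 256 := Int.emod_emod_of_dvd b (by norm_num)
  have h2 : b * 64 % 256 = b % 256 * 64 % 256 := by omega
  rw [h1, h2]

set_option maxRecDepth 100000 in
theorem key256 : ∀ n : Fin 256, process_char ((n : Nat) : Int) = process_char_alt ((n : Nat) : Int) := by
  decide

theorem pc_mod (b : Int) : process_char b = process_char (b % 256) := by
  simp only [process_char]
  rw [ror_congr]

theorem pc_alt_mod (b : Int) : process_char_alt b = process_char_alt (b % 256) := by
  simp only [process_char_alt]
  rw [ror_congr]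

-- ===== VERDICT (by name: the statement is the Claim_ definition above) =====
theorem process_char_spec : Claim_equal_process_char := by
  intro b _
  unfold Spec_process_char
  rw [pc_mod, pc_alt_mod]
  have h0 : 0 ≤ b % 256 := Int.emod_nonneg b (by norm_num)
  have h1 : b % 256 < 256 := Int.emod_lt_of_pos b (by norm_num)
  have hn : ((b % 256).toNat : Int) = b % 256 := Int.toNat_of_nonneg h0
  have := key256 ⟨(b % 256).toNat, by omega⟩
  simpa [hn] using this
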